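-- pv_equiv track=rewrite | github.com/Jennifer-Vo/Club-Recommendation-System- | club_functions.py | track_mutual_clubs
-- ===== SOURCE A (Python) =====
-- from typing import List, Tuple, Dict, TextIO
--
-- def update_dict(key: str, value: str,
--                 key_to_values: Dict[str, List[str]]) -> None:
--     """Update key_to_values with key/value. If key is in key_to_values,
--     and value is not already in the list associated with key,
--     append value to the list. Otherwise, add the pair key/[value] to
--     key_to_values.
--
--     >>> d = {'1': ['a', 'b']}
--     >>> update_dict('2', 'c', d)
--     >>> d == {'1': ['a', 'b'], '2': ['c']}
--     True
--     >>> update_dict('1', 'c', d)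
--     >>> d == {'1': ['a', 'b', 'c'], '2': ['c']}
--     True
--     >>> update_dict('1', 'c', d)
--     >>> d == {'1': ['a', 'b', 'c'], '2': ['c']}
--     True
--     """
--
--     if key not in key_to_values:
--         key_to_values[key] = []
--
--     if value not in key_to_values[key]:
--         key_to_values[key].append(value)
--
-- def track_mutual_clubs(person_to_clubs: Dict[str, List[str]],
--                        person: str) -> List[str]:
--     """Return a list, sorted in alphabetical order, of the clubs in
--     person_to_clubs that in which members have mutual clubs with person,
--     excluding the clubs that person belongs to.  Each club
--     appears in the returned list once per each of the person's friends
--     who belong to it.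
--
--     >>> track_mutual_clubs(P2C, 'Danny R Tanner')
--     ['Comics R Us', 'Rock N Rollers']
--     >>> track_mutual_clubs(P2C, 'Michelle Tanner')
--     []
--     """
--     clubs_to_person = invert_and_sort(person_to_clubs)
--     people_list = []
--     club_list = []
--     unique_list = []
--
--     if person not in person_to_clubs:
--         return []
--     for club in person_to_clubs[person]:
--         if club in clubs_to_person:
--             people_list.extend(clubs_to_person[club])
--     for member in people_list:
--         if member not in unique_list:
--             unique_list.append(member)
--     for member in unique_list:
--         for club in person_to_clubs[member]:
--             if club not in person_to_clubs[person]: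
--                 club_list.append(club)
--                 club_list.sort()
--     return club_list
--
-- def invert_and_sort(key_to_value: Dict[object, object]) -> Dict[object, list]:
--     """Return key_to_value inverted so that each key is a value (for
--     non-list values) or an item from an iterable value, and each value
--     is a list of the corresponding keys from key_to_value.  The value
--     lists in the returned dict are sorted.
--
--     >>> invert_and_sort(P2C) == {
--     ...  'Comet Club': ['Michelle Tanner'],
--     ...  'Parent Council': ['Danny R Tanner', 'Jesse Katsopolis',
--     ...                     'Joey Gladstone'],
--     ...  'Rock N Rollers': ['Jesse Katsopolis', 'Kimmy Gibbler'],
--     ...  'Comics R Us': ['Joey Gladstone'],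
--     ...  'Smash Club': ['Kimmy Gibbler']}
--     True
--     >>> invert_and_sort(P2F) == {
--     ...  'Danny R Tanner': ['Jesse Katsopolis'],
--     ...  'Joey Gladstone': ['Danny R Tanner', 'Jesse Katsopolis'],
--     ...  'Rebecca Donaldson-Katsopolis': ['Jesse Katsopolis'],
--     ...  'Kimmy Gibbler': ['Rebecca Donaldson-Katsopolis', 'Stephanie J Tanner'\
--     ],
--     ...  'Michelle Tanner': ['Stephanie J Tanner'],
--     ...  'Jesse Katsopolis': ['Danny R Tanner'],
--     ...  'DJ Tanner-Fuller': ['Danny R Tanner']}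
--     True
--     """
--     inverted_dict = {}
--     for key in key_to_value:
--         for value in key_to_value[key]:
--             update_dict(value, key, inverted_dict)
--             inverted_dict[value].sort()
--     return inverted_dict
-- ===== SOURCE B (Python) =====
-- def track_mutual_clubs(person_to_clubs, person):
--     if person not in person_to_clubs:
--         return []
--     pclubs = set(person_to_clubs[person])
--     club_list = []
--     for member in person_to_clubs:
--         clubs = person_to_clubs[member]
--         if pclubs.intersection(clubs):
--             for club in clubs:
--                 if club not in pclubs:
--                     club_list.append(club)
--     club_list.sort()
--     return club_list
-- ===== Notes on version B (the rewrite author's own statement) =====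
-- stated objective: faster
-- what changed: B drops A's inverted-index build (invert_and_sort/update_dict), the gather and dedup passes and the sort-after-every-append: it tests each member's club list directly against the person's club set in one scan and sorts the collected list once.
import Mathlib
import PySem

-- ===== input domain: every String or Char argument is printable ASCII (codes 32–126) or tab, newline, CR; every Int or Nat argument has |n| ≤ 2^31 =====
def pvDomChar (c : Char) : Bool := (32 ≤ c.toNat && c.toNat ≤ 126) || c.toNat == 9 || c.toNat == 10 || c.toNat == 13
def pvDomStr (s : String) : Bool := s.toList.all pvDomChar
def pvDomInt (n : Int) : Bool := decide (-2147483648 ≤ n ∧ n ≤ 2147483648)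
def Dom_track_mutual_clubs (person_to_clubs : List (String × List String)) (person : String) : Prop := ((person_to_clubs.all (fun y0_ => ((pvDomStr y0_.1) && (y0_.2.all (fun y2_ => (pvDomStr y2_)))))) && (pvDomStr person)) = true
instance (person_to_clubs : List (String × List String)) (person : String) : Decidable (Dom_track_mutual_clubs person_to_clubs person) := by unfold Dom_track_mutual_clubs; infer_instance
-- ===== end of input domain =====

-- B drops A's inverted-index helper (invert_and_sort/update_dict), the gather and dedup passes and the
-- per-append re-sorting: one scan tests each member's club list against the person's club set and sorts once.

-- shared helper: the Python dict d is a List (String × List String) (insertion order, first-match lookup);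
-- d[k] is pyDictGet (every use in both programs is guarded, so the [] default for a missing key is never hit),
-- and iterating a dict yields each key once, in order: pyDictKeys.
def pyDictGet (d : List (String × List String)) (k : String) : List String :=
  match d.find? (fun kv => kv.1 == k) with
  | some kv => kv.2
  | none => []

def pyDictKeys (d : List (String × List String)) : List String :=
  PySem.Set.ofList (d.map Prod.fst)

-- ===== PORT A =====
-- update_dict(key, value, key_to_values) — returns the updated dict (the Python mutates in place)
def update_dict (key : String) (value : String) (key_to_values : PySem.Dict String (List String)) :
    PySem.Dict String (List String) :=
  let d := if key_to_values.contains key then key_to_values else key_to_values.insert key []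
  if (d.getD key []).contains value then d else d.insert key (d.getD key [] ++ [value])

-- body of invert_and_sort's inner loop: update_dict(value, key, inverted_dict); inverted_dict[value].sort()
def invStep (key : String) (inv : PySem.Dict String (List String)) (value : String) :
    PySem.Dict String (List String) :=
  let inv := update_dict value key inv
  inv.insert value (PySem.List.sorted (inv.getD value []) (fun x => x) false)

def invert_and_sort (key_to_value : List (String × List String)) : PySem.Dict String (List String) :=
  (pyDictKeys key_to_value).foldl
    (fun inv key => (pyDictGet key_to_value key).foldl (fun inv value => invStep key inv value) inv)
    PySem.Dict.empty

def track_mutual_clubs (person_to_clubs : List (String × List String)) (person : String) : List String :=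
  let clubs_to_person := invert_and_sort person_to_clubs
  if (person_to_clubs.map Prod.fst).contains person = false then []
  else
    let people_list := (pyDictGet person_to_clubs person).foldl
      (fun acc club => if clubs_to_person.contains club then acc ++ clubs_to_person.getD club [] else acc) []
    let unique_list := people_list.foldl PySem.Set.add ([] : PySem.Set String)
    unique_list.foldl
      (fun club_list member =>
        (pyDictGet person_to_clubs member).foldl
          (fun club_list club =>
            if (pyDictGet person_to_clubs person).contains club then club_list
            else PySem.List.sorted (club_list ++ [club]) (fun x => x) false)
          club_list)
      []

-- ===== PORT B =====
def track_mutual_clubs_alt (person_to_clubs : List (String × List String)) (person : String) : List String :=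
  if (person_to_clubs.map Prod.fst).contains person = false then []
  else
    let pclubs : PySem.Set String := PySem.Set.ofList (pyDictGet person_to_clubs person)
    let club_list := (pyDictKeys person_to_clubs).foldl
      (fun acc member =>
        let clubs := pyDictGet person_to_clubs member
        if (PySem.Set.inter pclubs clubs).isEmpty then acc
        else clubs.foldl (fun acc club => if pclubs.contains club then acc else acc ++ [club]) acc)
      []
    PySem.List.sorted club_list (fun x => x) false

-- ===== PRECONDITION & SPEC =====
def Spec_track_mutual_clubs (person_to_clubs : List (String × List String)) (person : String) (out : List String) : Prop := out = track_mutual_clubs_alt person_to_clubs person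
instance (person_to_clubs : List (String × List String)) (person : String) (out : List String) : Decidable (Spec_track_mutual_clubs person_to_clubs person out) := by unfold Spec_track_mutual_clubs; infer_instance

-- ===== CLAIM (what is proved, stated in full; the proofs are below) =====
def Claim_equal_track_mutual_clubs : Prop := ∀ (person_to_clubs : List (String × List String)) (person : String), Dom_track_mutual_clubs person_to_clubs person → Spec_track_mutual_clubs person_to_clubs person (track_mutual_clubs person_to_clubs person)

-- ===== LEMMAS AND PROOFS =====

-- membership/contains after update_dict (A's helper)
theorem mem_update_dict (key value x m : String) (inv : PySem.Dict String (List String)) :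
    m ∈ (update_dict key value inv).getD x [] ↔ (m ∈ inv.getD x [] ∨ (x = key ∧ m = value)) := by
  simp only [update_dict]
  split_ifs with h1 h2 h3
  · by_cases hx : x = key
    · subst hx
      have hmem := List.contains_iff_mem.mp h2
      constructor
      · exact Or.inl
      · rintro (h | ⟨-, rfl⟩)
        · exact h
        · exact hmem
    · simp [hx]
  · by_cases hx : x = key
    · subst hx
      rw [PySem.Dict.getD_insert_self]
      simp
    · rw [PySem.Dict.getD_insert_of_ne _ _ _ hx]
      simp [hx]
  · exfalso
    rw [PySem.Dict.getD_insert_self] at h3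
    simp at h3
  · by_cases hx : x = key
    · subst hx
      rw [PySem.Dict.getD_insert_self, PySem.Dict.getD_insert_self,
          PySem.Dict.getD_of_not_contains inv ([] : List String) (by simpa using h1)]
      simp
    · rw [PySem.Dict.getD_insert_of_ne _ _ _ hx, PySem.Dict.getD_insert_of_ne _ _ _ hx]
      simp [hx]

theorem contains_update_dict (key value x : String) (inv : PySem.Dict String (List String)) :
    (update_dict key value inv).contains x = true ↔ (inv.contains x = true ∨ x = key) := by
  simp only [update_dict]
  split_ifs with h1 h2 h3
  · constructor
    · exact Or.inl
    · rintro (h | rfl)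
      · exact h
      · exact h1
  · simp only [PySem.Dict.contains_eq_decide_mem_keys, PySem.Dict.mem_keys_insert, decide_eq_true_eq] at *
    tauto
  · exfalso
    rw [PySem.Dict.getD_insert_self] at h3
    simp at h3
  · simp only [PySem.Dict.contains_eq_decide_mem_keys, PySem.Dict.mem_keys_insert, decide_eq_true_eq] at *
    tauto

-- membership/contains after one body of invert_and_sort's inner loop
theorem mem_invStep (key : String) (inv : PySem.Dict String (List String)) (value x m : String) :
    m ∈ (invStep key inv value).getD x [] ↔ (m ∈ inv.getD x [] ∨ (x = value ∧ m = key)) := by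
  simp only [invStep]
  by_cases hx : x = value
  · subst hx
    rw [PySem.Dict.getD_insert_self, PySem.List.mem_sorted, mem_update_dict]
  · rw [PySem.Dict.getD_insert_of_ne _ _ _ hx, mem_update_dict]

theorem contains_invStep (key : String) (inv : PySem.Dict String (List String)) (value x : String) :
    (invStep key inv value).contains x = true ↔ (inv.contains x = true ∨ x = value) := by
  simp only [invStep]
  simp only [PySem.Dict.contains_eq_decide_mem_keys, PySem.Dict.mem_keys_insert, decide_eq_true_eq]
  have h := contains_update_dict value key x inv
  simp only [PySem.Dict.contains_eq_decide_mem_keys, decide_eq_true_eq] at h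
  tauto

-- invert_and_sort's inner loop over one club list
theorem mem_invInner (key : String) (cs : List String) (inv : PySem.Dict String (List String)) (x m : String) :
    m ∈ (cs.foldl (fun inv value => invStep key inv value) inv).getD x [] ↔
      (m ∈ inv.getD x [] ∨ (x ∈ cs ∧ m = key)) := by
  induction cs generalizing inv with
  | nil => simp
  | cons c cs ih =>
    simp only [List.foldl_cons, ih, mem_invStep, List.mem_cons]
    tauto

theorem contains_invInner (key : String) (cs : List String) (inv : PySem.Dict String (List String)) (x : String) :
    (cs.foldl (fun inv value => invStep key inv value) inv).contains x = true ↔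
      (inv.contains x = true ∨ x ∈ cs) := by
  induction cs generalizing inv with
  | nil => simp
  | cons c cs ih =>
    simp only [List.foldl_cons, ih, contains_invStep, List.mem_cons]
    tauto

-- invert_and_sort's outer loop over a key list
theorem mem_invOuter (d : List (String × List String)) (ms : List String)
    (inv : PySem.Dict String (List String)) (x m : String) :
    m ∈ (ms.foldl (fun inv key => (pyDictGet d key).foldl (fun inv value => invStep key inv value) inv) inv).getD x [] ↔
      (m ∈ inv.getD x [] ∨ (m ∈ ms ∧ x ∈ pyDictGet d m)) := by
  induction ms generalizing inv with
  | nil => simp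
  | cons k ks ih =>
    simp only [List.foldl_cons, ih, mem_invInner, List.mem_cons]
    constructor
    · rintro ((h | ⟨hc, rfl⟩) | h) <;> tauto
    · rintro (h | ⟨(rfl | hm), hc⟩) <;> tauto

theorem contains_invOuter (d : List (String × List String)) (ms : List String)
    (inv : PySem.Dict String (List String)) (x : String) :
    (ms.foldl (fun inv key => (pyDictGet d key).foldl (fun inv value => invStep key inv value) inv) inv).contains x = true ↔
      (inv.contains x = true ∨ ∃ k ∈ ms, x ∈ pyDictGet d k) := by
  induction ms generalizing inv with
  | nil => simp
  | cons k ks ih =>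
    simp only [List.foldl_cons, ih, contains_invInner, List.mem_cons]
    constructor
    · rintro ((h | h) | ⟨k', hk', hc⟩)
      · exact Or.inl h
      · exact Or.inr ⟨k, Or.inl rfl, h⟩
      · exact Or.inr ⟨k', Or.inr hk', hc⟩
    · rintro (h | ⟨k', (rfl | hk'), hc⟩)
      · exact Or.inl (Or.inl h)
      · exact Or.inl (Or.inr hc)
      · exact Or.inr ⟨k', hk', hc⟩

-- what A's inverted index holds
theorem mem_invert (d : List (String × List String)) (x m : String) :
    m ∈ (invert_and_sort d).getD x [] ↔ (m ∈ d.map Prod.fst ∧ x ∈ pyDictGet d m) := by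
  have he : (PySem.Dict.empty : PySem.Dict String (List String)).getD x [] = [] :=
    PySem.Dict.getD_of_not_contains _ _ (PySem.Dict.contains_empty x)
  simp only [invert_and_sort, mem_invOuter, pyDictKeys, PySem.Set.mem_ofList, he,
    List.not_mem_nil, false_or]

theorem contains_invert (d : List (String × List String)) (x : String) :
    (invert_and_sort d).contains x = true ↔ ∃ k ∈ d.map Prod.fst, x ∈ pyDictGet d k := by
  simp only [invert_and_sort, contains_invOuter, pyDictKeys, PySem.Set.mem_ofList,
    PySem.Dict.contains_empty, Bool.false_eq_true, false_or]

-- membership in A's people_list loop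
theorem mem_gather (inv : PySem.Dict String (List String)) (cs : List String) (acc : List String) (m : String) :
    m ∈ cs.foldl (fun acc club => if inv.contains club then acc ++ inv.getD club [] else acc) acc ↔
      (m ∈ acc ∨ ∃ c ∈ cs, inv.contains c = true ∧ m ∈ inv.getD c []) := by
  induction cs generalizing acc with
  | nil => simp
  | cons c cs ih =>
    simp only [List.foldl_cons, List.mem_cons]
    by_cases hc : inv.contains c = true
    · simp only [hc, if_true, ih, List.mem_append]
      constructor
      · rintro ((h | h) | ⟨c', hc', h1, h2⟩)
        · exact Or.inl h
        · exact Or.inr ⟨c, Or.inl rfl, hc, h⟩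
        · exact Or.inr ⟨c', Or.inr hc', h1, h2⟩
      · rintro (h | ⟨c', (rfl | hc'), h1, h2⟩)
        · exact Or.inl (Or.inl h)
        · exact Or.inl (Or.inr h2)
        · exact Or.inr ⟨c', hc', h1, h2⟩
    · simp only [hc, if_false, ih]
      constructor
      · rintro (h | ⟨c', hc', h1, h2⟩)
        · exact Or.inl h
        · exact Or.inr ⟨c', Or.inr hc', h1, h2⟩
      · rintro (h | ⟨c', (rfl | hc'), h1, h2⟩)
        · exact Or.inl h
        · exact absurd h1 hc
        · exact Or.inr ⟨c', hc', h1, h2⟩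

-- A's append-then-sort loop over one club list
theorem sortAppend_inner (p : String → Bool) (l a : List String) :
    l.foldl (fun cl c => if p c then cl else PySem.List.sorted (cl ++ [c]) (fun x => x) false)
        (PySem.List.sorted a (fun x => x) false)
      = PySem.List.sorted (a ++ l.filter (fun c => !p c)) (fun x => x) false := by
  induction l generalizing a with
  | nil => simp
  | cons c l ih =>
    by_cases hp : p c = true
    · simp [List.foldl_cons, hp, ih]
    · have hs : PySem.List.sorted (PySem.List.sorted a (fun x => x) false ++ [c]) (fun x => x) false
          = PySem.List.sorted (a ++ [c]) (fun x => x) false := by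
        rw [PySem.List.sorted_id_eq_sorted_id_iff_perm]
        exact (PySem.List.sorted_perm a (fun x => x) false).append_right [c]
      rw [List.foldl_cons, if_neg hp, hs, ih (a ++ [c])]
      simp [hp, List.append_assoc]

-- A's append-then-sort loop over the members
theorem sortAppend_outer (p : String → Bool) (g : String → List String) (ms a : List String) :
    ms.foldl (fun cl member =>
        (g member).foldl (fun cl c => if p c then cl else PySem.List.sorted (cl ++ [c]) (fun x => x) false) cl)
        (PySem.List.sorted a (fun x => x) false)
      = PySem.List.sorted (a ++ ms.flatMap (fun mem => (g mem).filter (fun c => !p c))) (fun x => x) false := by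
  induction ms generalizing a with
  | nil => simp
  | cons mb ms ih =>
    simp only [List.foldl_cons, sortAppend_inner, ih, List.flatMap_cons]
    rw [List.append_assoc]

theorem sortAppend_outer_nil (p : String → Bool) (g : String → List String) (ms : List String) :
    ms.foldl (fun cl member =>
        (g member).foldl (fun cl c => if p c then cl else PySem.List.sorted (cl ++ [c]) (fun x => x) false) cl)
        []
      = PySem.List.sorted (ms.flatMap (fun mem => (g mem).filter (fun c => !p c))) (fun x => x) false := by
  simpa using sortAppend_outer p g ms []

-- B's inner append loop is a filter
theorem keep_foldl (s cs acc : List String) :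
    cs.foldl (fun acc c => if s.contains c then acc else acc ++ [c]) acc
      = acc ++ cs.filter (fun c => !s.contains c) := by
  rw [PySem.List.foldl_congr_mem cs _ (fun acc c => if (!s.contains c) then acc ++ [c] else acc) acc
      (by
        intro acc c _
        by_cases h : s.contains c = true <;> simp [h])]
  exact PySem.List.foldl_append_if_eq_filter _ cs acc

theorem contains_ofList_eq (l : List String) (c : String) :
    List.contains (PySem.Set.ofList l) c = List.contains l c := by
  rw [Bool.eq_iff_iff]
  exact List.contains_iff_mem.trans ((PySem.Set.mem_ofList l c).trans List.contains_iff_mem.symm)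

-- ===== VERDICT (by name: the statement is the Claim_ definition above) =====
theorem track_mutual_clubs_spec : Claim_equal_track_mutual_clubs := by
  intro d person _hdom
  unfold Spec_track_mutual_clubs
  by_cases hper : (d.map Prod.fst).contains person = false
  · simp only [track_mutual_clubs, track_mutual_clubs_alt, if_pos hper]
  · have hA :
        track_mutual_clubs d person
          = PySem.List.sorted
              ((((pyDictGet d person).foldl
                  (fun acc club =>
                    if (invert_and_sort d).contains club then acc ++ (invert_and_sort d).getD club []
                    else acc) []).foldl PySem.Set.add ([] : PySem.Set String)).flatMap
                (fun mem => (pyDictGet d mem).filter (fun c => !((pyDictGet d person).contains c))))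
              (fun x => x) false := by
      simp only [track_mutual_clubs, if_neg hper]
      exact sortAppend_outer_nil (fun c => (pyDictGet d person).contains c)
        (fun mb => pyDictGet d mb) _
    have hB :
        track_mutual_clubs_alt d person
          = PySem.List.sorted
              (((pyDictKeys d).filter
                  (fun mb => !(PySem.Set.inter (PySem.Set.ofList (pyDictGet d person)) (pyDictGet d mb)).isEmpty)).flatMap
                (fun mb => (pyDictGet d mb).filter (fun c => !((pyDictGet d person).contains c))))
              (fun x => x) false := by
      simp only [track_mutual_clubs_alt, if_neg hper]
      congr 1
      rw [PySem.List.foldl_congr_mem (pyDictKeys d) _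
          (fun acc mb =>
            if (!(PySem.Set.inter (PySem.Set.ofList (pyDictGet d person)) (pyDictGet d mb)).isEmpty)
            then acc ++ (pyDictGet d mb).filter (fun c => !((pyDictGet d person).contains c))
            else acc) []
          (by
            intro acc mb _
            cases hIE : (PySem.Set.inter (PySem.Set.ofList (pyDictGet d person)) (pyDictGet d mb)).isEmpty
            · have hk := keep_foldl (PySem.Set.ofList (pyDictGet d person)) (pyDictGet d mb) acc
              have hcf : (fun c => !(List.contains (PySem.Set.ofList (pyDictGet d person)) c))
                  = (fun c => !(List.contains (pyDictGet d person) c)) := by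
                funext c
                rw [contains_ofList_eq]
              rw [hcf] at hk
              simp only [hIE, Bool.false_eq_true, Bool.not_false, if_false, if_true]
              exact hk
            · simp only [hIE, Bool.not_true, Bool.false_eq_true, if_false]
              exact if_pos trivial)]
      rw [PySem.List.foldl_if_eq_foldl_filter, PySem.List.foldl_append_eq_flatMap,
        List.nil_append]
    rw [hA, hB, PySem.List.sorted_id_eq_sorted_id_iff_perm]
    refine List.Perm.flatMap_right _ ?_
    rw [← PySem.Set.ofList_eq_foldl]
    refine (List.perm_ext_iff_of_nodup (PySem.Set.nodup_ofList _)
      (List.Nodup.filter _ (PySem.Set.nodup_ofList _))).mpr ?_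
    intro m
    have hshare : ∀ mb : String,
        ((!(PySem.Set.inter (PySem.Set.ofList (pyDictGet d person)) (pyDictGet d mb)).isEmpty) = true)
          ↔ ∃ c ∈ pyDictGet d person, c ∈ pyDictGet d mb := by
      intro mb
      rw [Bool.not_eq_true', List.isEmpty_eq_false_iff, ne_eq, List.eq_nil_iff_forall_not_mem]
      push_neg
      simp only [PySem.Set.mem_inter, PySem.Set.mem_ofList]
    rw [PySem.Set.mem_ofList, mem_gather]
    simp only [List.not_mem_nil, false_or, mem_invert, contains_invert, List.mem_filter,
      pyDictKeys, PySem.Set.mem_ofList, hshare]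
    constructor
    · rintro ⟨c, hc, -, hm, hcm⟩
      exact ⟨hm, c, hc, hcm⟩
    · rintro ⟨hm, c, hc, hcm⟩
      exact ⟨c, hc, ⟨m, hm, hcm⟩, hm, hcm⟩
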